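-- pv_equiv track=rewrite | github.com/zzyu5/intent_ir | pipeline/triton/providers/flaggems/specs.py | _norm_conv1d_ncl
-- ===== SOURCE A (Python) =====
-- from typing import Any, Dict, List
--
-- def _norm_conv1d_ncl(shapes: Dict[str, int]) -> Dict[str, int]:
--     out = dict(shapes)
--     n = max(1, int(out.get("N", 2)))
--     c_in = max(1, int(out.get("C_IN", 4)))
--     c_out = max(1, int(out.get("C_OUT", 8)))
--     k = max(1, int(out.get("K", 3)))
--     stride = max(1, int(out.get("STRIDE", 1)))
--     padding = max(0, int(out.get("PADDING", 1)))
--     dilation = max(1, int(out.get("DILATION", 1)))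
--     groups = max(1, int(out.get("GROUPS", 1)))
--     groups = min(groups, c_in, c_out)
--     while groups > 1 and ((c_in % groups) != 0 or (c_out % groups) != 0):
--         groups -= 1
--     eff = dilation * (k - 1) + 1
--     min_l = max(1, eff - (2 * padding))
--     l = max(min_l, int(out.get("L", 32)))
--     out["N"] = n
--     out["C_IN"] = c_in
--     out["C_OUT"] = c_out
--     out["L"] = l
--     out["K"] = k
--     out["STRIDE"] = stride
--     out["PADDING"] = padding
--     out["DILATION"] = dilation
--     out["GROUPS"] = groups
--     out["C_PER_G"] = max(1, c_in // groups)
--     ol = ((l + (2 * padding) - (dilation * (k - 1)) - 1) // stride) + 1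
--     out["OL"] = max(1, int(ol))
--     return out
-- ===== SOURCE B (Python) =====
-- def _norm_conv1d_ncl(shapes):
--     out = dict(shapes)
--
--     def val(key, dflt, lo=1):
--         return max(lo, int(out.get(key, dflt)))
--
--     n, c_in, c_out, k = val("N", 2), val("C_IN", 4), val("C_OUT", 8), val("K", 3)
--     stride, padding, dilation = val("STRIDE", 1), val("PADDING", 1, 0), val("DILATION", 1)
--     cap = min(val("GROUPS", 1), c_in, c_out)
--     # largest common divisor of c_in and c_out not exceeding cap, found by
--     # enumerating divisor pairs (d, c_in // d) of c_in up to sqrt(c_in)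
--     groups = 1
--     d = 1
--     while d * d <= c_in:
--         if c_in % d == 0:
--             if d <= cap and c_out % d == 0 and groups < d:
--                 groups = d
--             e = c_in // d
--             if e <= cap and c_out % e == 0 and groups < e:
--                 groups = e
--         d += 1
--     eff = dilation * (k - 1) + 1
--     l = max(max(1, eff - 2 * padding), val("L", 32))
--     ol = (l + 2 * padding - dilation * (k - 1) - 1) // stride + 1
--     out.update({"N": n, "C_IN": c_in, "C_OUT": c_out, "L": l, "K": k,
--                 "STRIDE": stride, "PADDING": padding, "DILATION": dilation,
--                 "GROUPS": groups, "C_PER_G": max(1, c_in // groups), "OL": max(1, ol)})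
--     return out
-- ===== Notes on version B (the rewrite author's own statement) =====
-- stated objective: alternative
-- what changed: The group count is found by enumerating divisor pairs (d, c_in//d) of C_IN up to sqrt(C_IN) and keeping the largest one <= cap that also divides C_OUT, instead of A's one-step decrement loop from the cap; the clamped parameters are read via a small helper and written back with a single dict.update.
import Mathlib
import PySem

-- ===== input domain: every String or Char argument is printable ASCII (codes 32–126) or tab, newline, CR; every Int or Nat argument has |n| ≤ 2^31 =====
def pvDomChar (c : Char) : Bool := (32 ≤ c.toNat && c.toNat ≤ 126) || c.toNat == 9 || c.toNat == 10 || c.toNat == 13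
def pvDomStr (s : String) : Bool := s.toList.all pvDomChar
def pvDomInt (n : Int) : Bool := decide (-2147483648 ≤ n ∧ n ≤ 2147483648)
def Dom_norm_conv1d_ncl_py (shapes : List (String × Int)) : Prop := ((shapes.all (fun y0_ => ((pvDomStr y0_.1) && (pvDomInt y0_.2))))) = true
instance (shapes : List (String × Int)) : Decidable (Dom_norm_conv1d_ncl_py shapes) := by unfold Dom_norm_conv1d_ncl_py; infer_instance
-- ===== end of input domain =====

-- B replaces A's step-by-step decrement search for the group count by a divisor-pair
-- enumeration up to sqrt(C_IN) and table-driven normalization; same return value.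


-- ===== PORT A =====
-- while groups > 1 and ((c_in % groups) != 0 or (c_out % groups) != 0): groups -= 1
-- fuel = groups.toNat bounds the number of decrements (totality device only)
def pvGroupsLoop (c_in c_out : Int) : Nat → Int → Int
  | 0, groups => groups
  | fuel + 1, groups =>
    if 1 < groups ∧ (PySem.Int.mod c_in groups ≠ 0 ∨ PySem.Int.mod c_out groups ≠ 0) then
      pvGroupsLoop c_in c_out fuel (groups - 1)
    else groups

def norm_conv1d_ncl_py (shapes : List (String × Int)) : List (String × Int) :=
  let out := PySem.Dict.ofList shapes
  let n := max 1 (out.getD "N" 2)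
  let c_in := max 1 (out.getD "C_IN" 4)
  let c_out := max 1 (out.getD "C_OUT" 8)
  let k := max 1 (out.getD "K" 3)
  let stride := max 1 (out.getD "STRIDE" 1)
  let padding := max 0 (out.getD "PADDING" 1)
  let dilation := max 1 (out.getD "DILATION" 1)
  let groups0 := max 1 (out.getD "GROUPS" 1)
  let cap := min (min groups0 c_in) c_out
  let groups := pvGroupsLoop c_in c_out cap.toNat cap
  let eff := dilation * (k - 1) + 1
  let min_l := max 1 (eff - 2 * padding)
  let l := max min_l (out.getD "L" 32)
  let out := out.insert "N" n
  let out := out.insert "C_IN" c_in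
  let out := out.insert "C_OUT" c_out
  let out := out.insert "L" l
  let out := out.insert "K" k
  let out := out.insert "STRIDE" stride
  let out := out.insert "PADDING" padding
  let out := out.insert "DILATION" dilation
  let out := out.insert "GROUPS" groups
  let out := out.insert "C_PER_G" (max 1 (PySem.Int.floordiv c_in groups))
  let ol := PySem.Int.floordiv (l + 2 * padding - dilation * (k - 1) - 1) stride + 1
  let out := out.insert "OL" (max 1 ol)
  out.items

-- ===== PORT B =====
def pvVal (out : PySem.Dict String Int) (key : String) (dflt lo : Int) : Int :=
  max lo (out.getD key dflt)

-- if cond: groups = x  (one clause of B's inner update)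
def pvCand (c_out cap x groups : Int) : Int :=
  if x ≤ cap ∧ PySem.Int.mod c_out x = 0 ∧ groups < x then x else groups

-- while d * d <= c_in: test the divisor pair (d, c_in // d); keep the best valid one
-- fuel = c_in.toNat bounds the number of increments of d (totality device only)
def pvBestLoop (c_in c_out cap : Int) : Nat → Int → Int → Int
  | 0, _, groups => groups
  | fuel + 1, d, groups =>
    if d * d ≤ c_in then
      pvBestLoop c_in c_out cap fuel (d + 1)
        (if PySem.Int.mod c_in d = 0 then
           pvCand c_out cap (PySem.Int.floordiv c_in d) (pvCand c_out cap d groups)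
         else groups)
    else groups

def norm_conv1d_ncl_py_alt (shapes : List (String × Int)) : List (String × Int) :=
  let out := PySem.Dict.ofList shapes
  let n := pvVal out "N" 2 1
  let c_in := pvVal out "C_IN" 4 1
  let c_out := pvVal out "C_OUT" 8 1
  let k := pvVal out "K" 3 1
  let stride := pvVal out "STRIDE" 1 1
  let padding := pvVal out "PADDING" 1 0
  let dilation := pvVal out "DILATION" 1 1
  let cap := min (min (pvVal out "GROUPS" 1 1) c_in) c_out
  let groups := pvBestLoop c_in c_out cap c_in.toNat 1 1
  let eff := dilation * (k - 1) + 1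
  let l := max (max 1 (eff - 2 * padding)) (pvVal out "L" 32 1)
  let ol := PySem.Int.floordiv (l + 2 * padding - dilation * (k - 1) - 1) stride + 1
  (out.update [("N", n), ("C_IN", c_in), ("C_OUT", c_out), ("L", l), ("K", k),
               ("STRIDE", stride), ("PADDING", padding), ("DILATION", dilation),
               ("GROUPS", groups), ("C_PER_G", max 1 (PySem.Int.floordiv c_in groups)),
               ("OL", max 1 ol)]).items

-- ===== PRECONDITION & SPEC =====
def Spec_norm_conv1d_ncl_py (shapes : List (String × Int)) (out : List (String × Int)) : Prop := out = norm_conv1d_ncl_py_alt shapes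
instance (shapes : List (String × Int)) (out : List (String × Int)) : Decidable (Spec_norm_conv1d_ncl_py shapes out) := by unfold Spec_norm_conv1d_ncl_py; infer_instance

-- ===== CLAIM (what is proved, stated in full; the proofs are below) =====
def Claim_equal_norm_conv1d_ncl_py : Prop := ∀ (shapes : List (String × Int)), Dom_norm_conv1d_ncl_py shapes → Spec_norm_conv1d_ncl_py shapes (norm_conv1d_ncl_py shapes)

-- ===== LEMMAS AND PROOFS =====

-- "r is the greatest common divisor of c_in and c_out among 1..cap"
def pvIsG (c_in c_out cap r : Int) : Prop :=
  r ∣ c_in ∧ r ∣ c_out ∧ 1 ≤ r ∧ r ≤ cap ∧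
  ∀ e : Int, e ∣ c_in → e ∣ c_out → 1 ≤ e → e ≤ cap → e ≤ r

lemma pvIsG_unique {c_in c_out cap r s : Int}
    (hr : pvIsG c_in c_out cap r) (hs : pvIsG c_in c_out cap s) : r = s := by
  obtain ⟨hr1, hr2, hr3, hr4, hrm⟩ := hr
  obtain ⟨hs1, hs2, hs3, hs4, hsm⟩ := hs
  exact le_antisymm (hsm r hr1 hr2 hr3 hr4) (hrm s hs1 hs2 hs3 hs4)

lemma groupsLoop_isG : ∀ (n : ℕ) (c_in c_out cap : Int), cap.toNat ≤ n →
    1 ≤ c_in → 1 ≤ c_out → 1 ≤ cap →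
    pvIsG c_in c_out cap (pvGroupsLoop c_in c_out n cap) := by
  intro n
  induction n with
  | zero => intro c_in c_out cap hn _ _ hcap; omega
  | succ m ih =>
    intro c_in c_out cap hn hci hco hcap
    simp only [pvGroupsLoop]
    split_ifs with h
    · obtain ⟨hc1, hc2⟩ := h
      have hrec := ih c_in c_out (cap - 1) (by omega) hci hco (by omega)
      obtain ⟨h1, h2, h3, h4, hmax⟩ := hrec
      refine ⟨h1, h2, h3, by omega, ?_⟩
      intro e he1 he2 he3 he4
      by_cases hec : e ≤ cap - 1
      · exact hmax e he1 he2 he3 hec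
      · have hecap : e = cap := by omega
        exfalso
        rcases hc2 with hcin | hcout
        · exact hcin ((PySem.Int.mod_eq_zero_iff_dvd c_in cap).mpr (hecap ▸ he1))
        · exact hcout ((PySem.Int.mod_eq_zero_iff_dvd c_out cap).mpr (hecap ▸ he2))
    · push Not at h
      by_cases hc1 : 1 < cap
      · obtain ⟨hmi, hmo⟩ := h hc1
        refine ⟨(PySem.Int.mod_eq_zero_iff_dvd c_in cap).mp hmi,
                (PySem.Int.mod_eq_zero_iff_dvd c_out cap).mp hmo, hcap, le_refl _, ?_⟩
        intro e _ _ _ he4; exact he4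
      · have : cap = 1 := by omega
        subst this
        exact ⟨one_dvd _, one_dvd _, le_refl _, le_refl _, fun e _ _ _ he4 => he4⟩

lemma pvCand_spec (c_in c_out cap x groups : Int)
    (hgi : groups ∣ c_in) (hgo : groups ∣ c_out) (hg1 : 1 ≤ groups) (hgc : groups ≤ cap)
    (hx : x ∣ c_in) :
    pvCand c_out cap x groups ∣ c_in ∧ pvCand c_out cap x groups ∣ c_out ∧
    1 ≤ pvCand c_out cap x groups ∧ pvCand c_out cap x groups ≤ cap ∧
    groups ≤ pvCand c_out cap x groups ∧
    (x ≤ cap → x ∣ c_out → x ≤ pvCand c_out cap x groups) := by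
  unfold pvCand
  split_ifs with h
  · obtain ⟨ha, hb, hc⟩ := h
    exact ⟨hx, (PySem.Int.mod_eq_zero_iff_dvd c_out x).mp hb, by omega, ha, by omega,
           fun _ _ => le_refl _⟩
  · refine ⟨hgi, hgo, hg1, hgc, le_refl _, ?_⟩
    intro hxc hxo
    have hxg : ¬ groups < x := fun hlt => h ⟨hxc, (PySem.Int.mod_eq_zero_iff_dvd c_out x).mpr hxo, hlt⟩
    omega

lemma bestLoop_isG : ∀ (n : ℕ) (c_in c_out cap d best : Int),
    (c_in + 1 - d).toNat ≤ n → 1 ≤ c_in → 1 ≤ c_out → 1 ≤ cap → 1 ≤ d →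
    best ∣ c_in → best ∣ c_out → 1 ≤ best → best ≤ cap →
    (∀ e : Int, e ∣ c_in → e ∣ c_out → 1 ≤ e → e ≤ cap → (e < d ∨ c_in < e * d) → e ≤ best) →
    pvIsG c_in c_out cap (pvBestLoop c_in c_out cap n d best) := by
  intro n
  induction n with
  | zero =>
    intro c_in c_out cap d best hn hci hco hcap hd hbi hbo hb1 hbc hcov
    have hdc : c_in + 1 ≤ d := by omega
    simp only [pvBestLoop]
    refine ⟨hbi, hbo, hb1, hbc, ?_⟩
    intro e he1 he2 he3 he4
    refine hcov e he1 he2 he3 he4 ?_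
    by_cases hed : e < d
    · exact Or.inl hed
    · right
      have hde : d ≤ e := by omega
      nlinarith
  | succ m ih =>
    intro c_in c_out cap d best hn hci hco hcap hd hbi hbo hb1 hbc hcov
    simp only [pvBestLoop]
    by_cases hdd : d * d ≤ c_in
    · rw [if_pos hdd]
      have hd0 : (0 : Int) < d := by omega
      have hdcin : d ≤ c_in := by nlinarith
      by_cases hm : PySem.Int.mod c_in d = 0
      · rw [if_pos hm]
        have hdvd : d ∣ c_in := (PySem.Int.mod_eq_zero_iff_dvd c_in d).mp hm
        set e0 := PySem.Int.floordiv c_in d with he0def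
        have hfd : e0 = c_in / d := by
          rw [he0def, PySem.Int.floordiv_eq_ediv_of_pos hd0]
        have he0mul : e0 * d = c_in := by
          rw [hfd]; exact Int.ediv_mul_cancel hdvd
        have he0dvd : e0 ∣ c_in := ⟨d, he0mul.symm⟩
        obtain ⟨hg2i, hg2o, hg21, hg2c, hbg2, hg2d⟩ :=
          pvCand_spec c_in c_out cap d best hbi hbo hb1 hbc hdvd
        set g2 := pvCand c_out cap d best with hg2def
        obtain ⟨hg1i, hg1o, hg11, hg1c, hg2g1, hg1e⟩ :=
          pvCand_spec c_in c_out cap e0 g2 hg2i hg2o hg21 hg2c he0dvd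
        set g1 := pvCand c_out cap e0 g2 with hg1def
        apply ih c_in c_out cap (d + 1) g1 (by omega) hci hco hcap (by omega) hg1i hg1o hg11 hg1c
        intro e he1 he2 he3 he4 hcase
        by_cases hold : e < d ∨ c_in < e * d
        · have := hcov e he1 he2 he3 he4 hold
          omega
        · push Not at hold
          obtain ⟨hde, hed⟩ := hold
          rcases hcase with hlt | hbig
          · -- e = d : first candidate
            have hedq : e = d := by omega
            have := hg2d (hedq ▸ he4) (hedq ▸ he2)
            omega
          · -- e is the cofactor c_in // d : second candidate
            obtain ⟨q, hq⟩ := he1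
            have hq1 : d ≤ q := le_of_mul_le_mul_left (by nlinarith) (by omega : (0:ℤ) < e)
            have hq2 : q < d + 1 := lt_of_mul_lt_mul_left (by nlinarith) (by omega : (0:ℤ) ≤ e)
            have hq_eq : q = d := by omega
            have hee0 : e0 = e := by
              rw [hfd, hq, hq_eq, Int.mul_ediv_cancel _ (by omega : d ≠ 0)]
            have := hg1e (hee0 ▸ he4) (hee0 ▸ he2)
            omega
      · rw [if_neg hm]
        apply ih c_in c_out cap (d + 1) best (by omega) hci hco hcap (by omega) hbi hbo hb1 hbc
        intro e he1 he2 he3 he4 hcase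
        by_cases hold : e < d ∨ c_in < e * d
        · exact hcov e he1 he2 he3 he4 hold
        · push Not at hold
          obtain ⟨hde, hed⟩ := hold
          rcases hcase with hlt | hbig
          · have hedq : e = d := by omega
            exact absurd ((PySem.Int.mod_eq_zero_iff_dvd c_in d).mpr (hedq ▸ he1)) hm
          · obtain ⟨q, hq⟩ := he1
            have hq1 : d ≤ q := le_of_mul_le_mul_left (by nlinarith) (by omega : (0:ℤ) < e)
            have hq2 : q < d + 1 := lt_of_mul_lt_mul_left (by nlinarith) (by omega : (0:ℤ) ≤ e)
            have hq_eq : q = d := by omega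
            have : d ∣ c_in := ⟨e, by rw [hq, hq_eq]; ring⟩
            exact absurd ((PySem.Int.mod_eq_zero_iff_dvd c_in d).mpr this) hm
    · rw [if_neg hdd]
      refine ⟨hbi, hbo, hb1, hbc, ?_⟩
      intro e he1 he2 he3 he4
      refine hcov e he1 he2 he3 he4 ?_
      by_cases hed : e < d
      · exact Or.inl hed
      · right
        have hde : d ≤ e := by omega
        nlinarith

lemma loops_eq (c_in c_out cap : Int) (hci : 1 ≤ c_in) (hco : 1 ≤ c_out) (hcap : 1 ≤ cap) :
    pvGroupsLoop c_in c_out cap.toNat cap = pvBestLoop c_in c_out cap c_in.toNat 1 1 := by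
  have hA := groupsLoop_isG cap.toNat c_in c_out cap (le_refl _) hci hco hcap
  have hB := bestLoop_isG c_in.toNat c_in c_out cap 1 1 (by omega) hci hco hcap
      (le_refl _) (one_dvd _) (one_dvd _) (le_refl _) hcap ?_
  · exact pvIsG_unique hA hB
  · intro e he1 _ he3 _ hcase
    have hle : e ≤ c_in := Int.le_of_dvd (by omega) he1
    rcases hcase with h | h
    · omega
    · omega

lemma max_one_absorb (a b : Int) : max (max 1 a) (max 1 b) = max (max 1 a) b := by omega

-- ===== VERDICT (by name: the statement is the Claim_ definition above) =====
theorem norm_conv1d_ncl_py_spec : Claim_equal_norm_conv1d_ncl_py := by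
  intro shapes _
  unfold Spec_norm_conv1d_ncl_py
  simp only [norm_conv1d_ncl_py, norm_conv1d_ncl_py_alt, pvVal, PySem.Dict.update, List.foldl]
  rw [max_one_absorb]
  rw [loops_eq _ _ _ (le_max_left _ _) (le_max_left _ _) (by omega)]
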